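-- pv_equiv track=rewrite | github.com/julietawenger/DI-Bootcamp | Week1/Day5/Mini-Project.py | rowcolumn_to_index
-- ===== SOURCE A (Python) =====
-- def rowcolumn_to_index(row,column):
--     """User writes row and column and the function returns the index corresponding
--     to the box to be updated."""
--
--     indexes = [1, 5, 9, 25, 29, 33, 49, 53, 57]
--     counter = 0
--     for i in range(1,4):
--         for j in range(1,4):
--             if row == i and column == j:
--                 return indexes[counter]
--             counter+=1
-- ===== SOURCE B (Python) =====
-- def rowcolumn_to_index(row, column):
--     """Closed-form: bounds check then direct arithmetic into the same table."""
--     indexes = [1, 5, 9, 25, 29, 33, 49, 53, 57]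
--     if 1 <= row <= 3 and 1 <= column <= 3:
--         return indexes[(row - 1) * 3 + (column - 1)]
-- ===== Notes on version B (the rewrite author's own statement) =====
-- stated objective: simpler
-- what changed: Replaces the 3x3 nested counting scan with a bounds check and a closed-form index (row-1)*3+(column-1) into the same table.
import Mathlib
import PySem

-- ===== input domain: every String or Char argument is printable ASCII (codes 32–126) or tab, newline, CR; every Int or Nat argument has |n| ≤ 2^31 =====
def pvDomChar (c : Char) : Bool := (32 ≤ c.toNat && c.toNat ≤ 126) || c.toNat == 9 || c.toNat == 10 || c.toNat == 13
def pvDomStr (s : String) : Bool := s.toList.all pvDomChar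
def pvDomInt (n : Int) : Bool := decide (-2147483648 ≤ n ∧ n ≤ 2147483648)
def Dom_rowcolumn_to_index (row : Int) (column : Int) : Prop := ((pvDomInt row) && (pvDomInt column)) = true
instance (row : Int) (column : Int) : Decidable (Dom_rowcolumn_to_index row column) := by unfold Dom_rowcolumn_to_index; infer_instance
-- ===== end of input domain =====

-- B replaces A's nested 3x3 counting scan with a bounds check and the closed-form index (row-1)*3+(column-1); objective: simpler.


-- ===== PORT A =====
-- literal port of A: nested for-loops over range(1,4) with a running counter and early return
def rowcolumn_to_index (row : Int) (column : Int) : Option Int :=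
  let indexes : List Int := [1, 5, 9, 25, 29, 33, 49, 53, 57]
  let st := (PySem.List.pyRange 1 4 1).foldl (fun (st : Option Int × Int) i =>
    match st with
    | (some v, c) => (some v, c)          -- already returned
    | (none, c) =>
      (PySem.List.pyRange 1 4 1).foldl (fun (st2 : Option Int × Int) j =>
        match st2 with
        | (some v, c2) => (some v, c2)
        | (none, c2) =>
          if row == i && column == j then (PySem.List.pyGet? indexes c2, c2)
          else (none, c2 + 1)) (none, c)) ((none : Option Int), (0 : Int))
  match st with
  | (some v, _) => some v
  | (none, _) => none

-- ===== PORT B =====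
def rowcolumn_to_index_alt (row : Int) (column : Int) : Option Int :=
  let indexes : List Int := [1, 5, 9, 25, 29, 33, 49, 53, 57]
  if 1 ≤ row ∧ row ≤ 3 ∧ 1 ≤ column ∧ column ≤ 3 then
    PySem.List.pyGet? indexes ((row - 1) * 3 + (column - 1))
  else none

-- ===== PRECONDITION & SPEC =====
def Spec_rowcolumn_to_index (row : Int) (column : Int) (out : Option Int) : Prop := out = rowcolumn_to_index_alt row column
instance (row : Int) (column : Int) (out : Option Int) : Decidable (Spec_rowcolumn_to_index row column out) := by unfold Spec_rowcolumn_to_index; infer_instance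

-- ===== CLAIM (what is proved, stated in full; the proofs are below) =====
def Claim_equal_rowcolumn_to_index : Prop := ∀ (row : Int) (column : Int), Dom_rowcolumn_to_index row column → Spec_rowcolumn_to_index row column (rowcolumn_to_index row column)

-- ===== LEMMAS AND PROOFS =====

-- ===== VERDICT (by name: the statement is the Claim_ definition above) =====
theorem rowcolumn_to_index_spec : Claim_equal_rowcolumn_to_index := by
  intro row column _
  show rowcolumn_to_index row column = rowcolumn_to_index_alt row column
  by_cases hr : 1 ≤ row ∧ row ≤ 3
  · by_cases hc : 1 ≤ column ∧ column ≤ 3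
    · -- both in range: nine concrete cases
      have hrow : row = 1 ∨ row = 2 ∨ row = 3 := by omega
      have hcol : column = 1 ∨ column = 2 ∨ column = 3 := by omega
      rcases hrow with h | h | h <;> rcases hcol with h' | h' | h' <;> subst h <;> subst h' <;> decide
    · -- column out of range: A never matches, B's guard fails
      have hR : PySem.List.pyRange 1 4 1 = [1, 2, 3] := by decide
      have h1 : column ≠ 1 := by omega
      have h2 : column ≠ 2 := by omega
      have h3 : column ≠ 3 := by omega
      simp [rowcolumn_to_index, rowcolumn_to_index_alt, hR, List.foldl, h1, h2, h3]
      omega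
  · -- row out of range
    have hR : PySem.List.pyRange 1 4 1 = [1, 2, 3] := by decide
    have h1 : row ≠ 1 := by omega
    have h2 : row ≠ 2 := by omega
    have h3 : row ≠ 3 := by omega
    simp [rowcolumn_to_index, rowcolumn_to_index_alt, hR, List.foldl, h1, h2, h3]
    omega
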